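-- pv_equiv track=rewrite | github.com/Oushesh/Impact_Nexus005 | smart_evidence/components/processors/paragraph_processor.py | _valid_index
-- ===== SOURCE A (Python) =====
-- def _valid_index(document: str, idx: int) -> int:
--     if idx <= 0:
--         return 0
--     if idx >= len(document):
--         return len(document)
--     new_idx = idx
--     while new_idx > 0:
--         if document[new_idx] in [" ", "\n", "\t"]:
--             break
--         new_idx -= 1
--     return new_idx
-- ===== SOURCE B (Python) =====
-- def _valid_index(document: str, idx: int) -> int:
--     if idx <= 0:
--         return 0
--     n = len(document)
--     if idx >= n:
--         return n
--     pos = max(document.rfind(c, 0, idx + 1) for c in (" ", "\n", "\t"))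
--     return max(pos, 0)
-- ===== Notes on version B (the rewrite author's own statement) =====
-- stated objective: idiomatic
-- what changed: Replaces the explicit decrementing backward scan with three reverse library searches str.rfind(c, 0, idx+1), one per whitespace character, combined by max and clamped to 0.
import Mathlib
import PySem

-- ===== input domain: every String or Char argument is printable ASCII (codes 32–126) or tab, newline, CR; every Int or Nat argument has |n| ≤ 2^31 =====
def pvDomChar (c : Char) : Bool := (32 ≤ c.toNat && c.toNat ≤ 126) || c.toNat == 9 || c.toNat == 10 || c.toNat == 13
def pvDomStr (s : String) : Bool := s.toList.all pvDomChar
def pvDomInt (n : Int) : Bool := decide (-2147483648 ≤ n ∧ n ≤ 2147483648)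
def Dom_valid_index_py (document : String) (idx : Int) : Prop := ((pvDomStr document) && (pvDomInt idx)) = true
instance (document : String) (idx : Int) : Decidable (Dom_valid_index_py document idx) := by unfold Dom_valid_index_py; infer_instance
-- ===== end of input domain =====

-- B replaces A's explicit decrementing backward scan with three reverse searches (rfind per
-- whitespace character) combined by max and clamped to 0; objective: more idiomatic, same cost.

-- ===== PORT A =====
-- the while loop of A: fuel = new_idx; checks document[new_idx] and decrements
def loopA (cs : List Char) : Nat → Int
  | 0 => 0
  | n + 1 =>
    if PySem.List.pyGet? cs ((n + 1 : Nat) : Int) ∈ [some ' ', some '\n', some '\t'] then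
      ((n + 1 : Nat) : Int)
    else loopA cs n

def valid_index_py (document : String) (idx : Int) : Int :=
  if idx ≤ 0 then 0
  else if idx ≥ PySem.Str.len document then PySem.Str.len document
  else loopA document.toList idx.toNat

-- ===== PORT B =====
-- hand port of str.rfind(c, 0, hi): scan positions hi-1 … 0, return first hit, else -1;
-- exact for 0 ≤ hi ≤ len(document) (the only way B calls it)
def pyRfind (cs : List Char) (c : Char) : Nat → Int
  | 0 => -1
  | n + 1 => if PySem.List.pyGet? cs ((n : Nat) : Int) = some c then ((n : Nat) : Int) else pyRfind cs c n

def valid_index_py_alt (document : String) (idx : Int) : Int :=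
  if idx ≤ 0 then 0
  else if idx ≥ PySem.Str.len document then PySem.Str.len document
  else
    let cs := document.toList
    let pos := max (max (pyRfind cs ' ' (idx.toNat + 1)) (pyRfind cs '\n' (idx.toNat + 1)))
                   (pyRfind cs '\t' (idx.toNat + 1))
    max pos 0

-- ===== PRECONDITION & SPEC =====
def Spec_valid_index_py (document : String) (idx : Int) (out : Int) : Prop := out = valid_index_py_alt document idx
instance (document : String) (idx : Int) (out : Int) : Decidable (Spec_valid_index_py document idx out) := by unfold Spec_valid_index_py; infer_instance

-- ===== CLAIM (what is proved, stated in full; the proofs are below) =====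
def Claim_equal_valid_index_py : Prop := ∀ (document : String) (idx : Int), Dom_valid_index_py document idx → Spec_valid_index_py document idx (valid_index_py document idx)

-- ===== LEMMAS AND PROOFS =====

theorem pyRfind_le (cs : List Char) (c : Char) (m : Nat) : pyRfind cs c m ≤ (m : Int) - 1 := by
  induction m with
  | zero => simp [pyRfind]
  | succ m ih => simp only [pyRfind]; split_ifs <;> push_cast <;> omega

set_option maxHeartbeats 1000000 in
theorem loopA_eq (cs : List Char) (n : Nat) :
    loopA cs n =
      max (max (max (pyRfind cs ' ' (n + 1)) (pyRfind cs '\n' (n + 1))) (pyRfind cs '\t' (n + 1))) 0 := by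
  induction n with
  | zero =>
    have h1 := pyRfind_le cs ' ' 1
    have h2 := pyRfind_le cs '\n' 1
    have h3 := pyRfind_le cs '\t' 1
    simp only [Nat.zero_add]
    show (0 : Int) = _
    push_cast at *
    omega
  | succ n ih =>
    have h1 := pyRfind_le cs ' ' (n + 1)
    have h2 := pyRfind_le cs '\n' (n + 1)
    have h3 := pyRfind_le cs '\t' (n + 1)
    have e1 : loopA cs (n + 1) =
        if PySem.List.pyGet? cs ((n + 1 : Nat) : Int) ∈ [some ' ', some '\n', some '\t'] then
          ((n + 1 : Nat) : Int)
        else loopA cs n := rfl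
    have e2 : ∀ c, pyRfind cs c (n + 1 + 1) =
        if PySem.List.pyGet? cs ((n + 1 : Nat) : Int) = some c then ((n + 1 : Nat) : Int)
        else pyRfind cs c (n + 1) := fun _ => rfl
    rw [e1, e2, e2, e2]
    by_cases a : PySem.List.pyGet? cs ((n + 1 : Nat) : Int) = some ' ' <;>
      by_cases b : PySem.List.pyGet? cs ((n + 1 : Nat) : Int) = some '\n' <;>
        by_cases c2 : PySem.List.pyGet? cs ((n + 1 : Nat) : Int) = some '\t' <;>
          simp_all <;> omega

-- ===== VERDICT (by name: the statement is the Claim_ definition above) =====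
theorem valid_index_py_spec : Claim_equal_valid_index_py := by
  intro document idx _
  unfold Spec_valid_index_py valid_index_py valid_index_py_alt
  split_ifs with h1 h2
  · rfl
  · rfl
  · exact loopA_eq document.toList idx.toNat
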